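-- pv_equiv track=rewrite | github.com/felix-mk/FiveWords | main.py | filter_duplicate_letters
-- ===== SOURCE A (Python) =====
-- def filter_duplicate_letters(words):
-- 	words_no_duplicate_letters = []
--
-- 	for word in words:
-- 		char_set = set()
-- 		no_duplicates = True
--
-- 		for char in word:
-- 			if char not in char_set:
-- 				char_set.add(char)
-- 			else:
-- 				no_duplicates = False
-- 				break
--
-- 		if no_duplicates:
-- 			words_no_duplicate_letters.append(word)
--
-- 	return words_no_duplicate_letters
-- ===== SOURCE B (Python) =====
-- def filter_duplicate_letters(words):
-- 	result = []
-- 	for word in words: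
-- 		s = sorted(word)
-- 		if all(s[i] != s[i + 1] for i in range(len(s) - 1)):
-- 			result.append(word)
-- 	return result
-- ===== Notes on version B (the rewrite author's own statement) =====
-- stated objective: alternative
-- what changed: Replaces the incremental hash-set membership check (with early break) by sorting each word's letters once and scanning adjacent pairs of the sorted sequence for an equal pair.
import Mathlib
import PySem

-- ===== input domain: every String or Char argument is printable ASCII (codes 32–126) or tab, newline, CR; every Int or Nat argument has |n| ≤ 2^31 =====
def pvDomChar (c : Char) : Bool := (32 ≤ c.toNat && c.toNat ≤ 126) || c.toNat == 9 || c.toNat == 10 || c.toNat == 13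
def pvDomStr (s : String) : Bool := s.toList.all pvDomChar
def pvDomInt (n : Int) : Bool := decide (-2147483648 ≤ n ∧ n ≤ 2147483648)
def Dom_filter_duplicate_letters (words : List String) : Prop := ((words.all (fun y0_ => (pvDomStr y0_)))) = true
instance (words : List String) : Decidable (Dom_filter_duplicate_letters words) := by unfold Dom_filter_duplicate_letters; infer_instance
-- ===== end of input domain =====

-- B keeps words whose sorted letters have no equal adjacent pair, instead of A's incremental set-membership scan with a break; return values agree on all inputs.

-- ===== PORT A =====
-- inner loop of A: walk the word's chars with a growing set, break (return false) on a repeat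
def pvACheck : List Char → PySem.Set Char → Bool
  | [], _ => true
  | c :: cs, s => if PySem.Set.contains s c then false else pvACheck cs (PySem.Set.add s c)

def filter_duplicate_letters (words : List String) : List String :=
  words.foldl (fun acc w => if pvACheck w.toList PySem.Set.empty then acc ++ [w] else acc) []

-- ===== PORT B =====
-- all(s[i] != s[i+1] for i in range(len(s)-1)) over the sorted char list
def pvNoAdjDup : List Char → Bool
  | [] => true
  | [_] => true
  | a :: b :: rest => a != b && pvNoAdjDup (b :: rest)

def filter_duplicate_letters_alt (words : List String) : List String :=
  words.filter (fun w => pvNoAdjDup (PySem.List.sorted w.toList (fun c => c) false))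

-- ===== PRECONDITION & SPEC =====
def Spec_filter_duplicate_letters (words : List String) (out : List String) : Prop := out = filter_duplicate_letters_alt words
instance (words : List String) (out : List String) : Decidable (Spec_filter_duplicate_letters words out) := by unfold Spec_filter_duplicate_letters; infer_instance

-- ===== CLAIM (what is proved, stated in full; the proofs are below) =====
def Claim_equal_filter_duplicate_letters : Prop := ∀ (words : List String), Dom_filter_duplicate_letters words → Spec_filter_duplicate_letters words (filter_duplicate_letters words)

-- ===== LEMMAS AND PROOFS =====

theorem pvACheck_iff (l : List Char) : ∀ s : PySem.Set Char,
    (pvACheck l s = true ↔ l.Nodup ∧ ∀ c ∈ l, c ∉ s) := by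
  induction l with
  | nil => intro s; simp [pvACheck]
  | cons c cs ih =>
    intro s
    by_cases hc : c ∈ s
    · rw [show pvACheck (c :: cs) s = false by
        rw [pvACheck, (PySem.Set.contains_iff s c).mpr hc, if_pos rfl]]
      refine iff_of_false (by simp) ?_
      rintro ⟨_, h⟩; exact (h c (by simp)) hc
    · have hcont : PySem.Set.contains s c = false := by
        cases h : PySem.Set.contains s c
        · rfl
        · exact absurd ((PySem.Set.contains_iff s c).mp h) hc
      rw [show pvACheck (c :: cs) s = pvACheck cs (PySem.Set.add s c) by
        rw [pvACheck, hcont]; simp]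
      rw [ih]
      constructor
      · rintro ⟨hnd, hmem⟩
        have hcn : c ∉ cs := by
          intro hin
          exact (hmem c hin) ((PySem.Set.mem_add s c c).mpr (Or.inr rfl))
        refine ⟨List.nodup_cons.mpr ⟨hcn, hnd⟩, ?_⟩
        intro x hx
        rcases List.mem_cons.mp hx with hxc | hx'
        · exact hxc ▸ hc
        · intro hxs
          exact (hmem x hx') ((PySem.Set.mem_add s c x).mpr (Or.inl hxs))
      · rintro ⟨hnd, hmem⟩
        rcases List.nodup_cons.mp hnd with ⟨hcn, hnd'⟩
        refine ⟨hnd', ?_⟩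
        intro x hx hxadd
        rcases (PySem.Set.mem_add s c x).mp hxadd with hxs | hxc
        · exact (hmem x (List.mem_cons.mpr (Or.inr hx))) hxs
        · exact hcn (hxc ▸ hx)

theorem pvNoAdjDup_iff (t : List Char) (h : t.Pairwise (· ≤ ·)) :
    (pvNoAdjDup t = true ↔ t.Nodup) := by
  induction t with
  | nil => simp [pvNoAdjDup]
  | cons a rest ih =>
    cases rest with
    | nil => simp [pvNoAdjDup]
    | cons b rest' =>
      have hab : a ≤ b := (List.pairwise_cons.mp h).1 b (by simp)
      have hbr : ∀ x ∈ rest', b ≤ x :=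
        fun x hx => (List.pairwise_cons.mp (List.pairwise_cons.mp h).2).1 x hx
      have htail := ih (List.pairwise_cons.mp h).2
      simp only [pvNoAdjDup, Bool.and_eq_true, bne_iff_ne, ne_eq]
      rw [htail]
      constructor
      · rintro ⟨hne, hnd⟩
        rcases List.nodup_cons.mp hnd with ⟨hbn, hnd'⟩
        refine List.nodup_cons.mpr ⟨?_, hnd⟩
        intro hmem
        rcases List.mem_cons.mp hmem with hab' | hmem'
        · exact hne hab'
        · exact hne (le_antisymm hab (hbr a hmem'))
      · intro hnd
        rcases List.nodup_cons.mp hnd with ⟨han, hnd'⟩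
        exact ⟨fun hab' => han (hab' ▸ List.mem_cons.mpr (Or.inl rfl)), hnd'⟩

theorem pv_word_agree (w : String) :
    pvACheck w.toList PySem.Set.empty = pvNoAdjDup (PySem.List.sorted w.toList (fun c => c) false) := by
  have h1 : pvACheck w.toList PySem.Set.empty = true ↔ w.toList.Nodup := by
    rw [pvACheck_iff]
    simp [PySem.Set.empty]
  have hp : (PySem.List.sorted w.toList (fun c => c) false).Pairwise (· ≤ ·) := by
    have := PySem.List.sorted_pairwise (xs := w.toList) (key := fun c => c)
    simpa using this
  have h2 : pvNoAdjDup (PySem.List.sorted w.toList (fun c => c) false) = true ↔ w.toList.Nodup := by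
    rw [pvNoAdjDup_iff _ hp]
    exact (PySem.List.sorted_perm w.toList (fun c => c) false).nodup_iff
  cases ha : pvACheck w.toList PySem.Set.empty
  · cases hb : pvNoAdjDup (PySem.List.sorted w.toList (fun c => c) false)
    · rfl
    · exact absurd (h1.mpr (h2.mp hb)) (ha ▸ (by simp))
  · exact (h2.mpr (h1.mp ha)).symm

-- ===== VERDICT (by name: the statement is the Claim_ definition above) =====
theorem filter_duplicate_letters_spec : Claim_equal_filter_duplicate_letters := by
  intro words _
  unfold Spec_filter_duplicate_letters filter_duplicate_letters filter_duplicate_letters_alt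
  rw [PySem.List.foldl_append_if_eq_filter]
  simp only [List.nil_append]
  congr 1
  funext w
  exact pv_word_agree w
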